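-- pv_equiv track=rewrite | github.com/fvg98/transparencia-de-datos | crawlerSIL.py | encuentraDivision
-- ===== SOURCE A (Python) =====
-- def encuentraDivision(todo,categorias):
--     indices=[]; i=0; j=0
--     while i<len(todo) and j<len(categorias):
--           if todo[i] == categorias[j]:
--               indices.append(i);i+=1; j+=1
--           else:
--               i+=1
--     return indices
-- ===== SOURCE B (Python) =====
-- def _lower_bound(lst, x):
--     # first index k with lst[k] >= x, by binary search (lst sorted ascending)
--     lo = 0
--     hi = len(lst)
--     while lo < hi:
--         mid = (lo + hi) // 2
--         if lst[mid] < x: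
--             lo = mid + 1
--         else:
--             hi = mid
--     return lo
--
-- def encuentraDivision(todo, categorias):
--     # index todo once: value -> sorted list of its positions
--     pos = {}
--     for k, v in enumerate(todo):
--         pos.setdefault(v, []).append(k)
--     indices = []
--     i = 0
--     for cat in categorias:
--         lst = pos.get(cat)
--         if lst is None:
--             break
--         k = _lower_bound(lst, i)
--         if k == len(lst):
--             break
--         p = lst[k]
--         indices.append(p)
--         i = p + 1
--     return indices
-- ===== Notes on version B (the rewrite author's own statement) =====
-- stated objective: alternative
-- what changed: Builds a value->sorted-positions hash index of todo in one pass, then answers each categoria by a hand-written binary search for its next position >= a running cursor, instead of A's two-pointer sweep over todo.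
import Mathlib
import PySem

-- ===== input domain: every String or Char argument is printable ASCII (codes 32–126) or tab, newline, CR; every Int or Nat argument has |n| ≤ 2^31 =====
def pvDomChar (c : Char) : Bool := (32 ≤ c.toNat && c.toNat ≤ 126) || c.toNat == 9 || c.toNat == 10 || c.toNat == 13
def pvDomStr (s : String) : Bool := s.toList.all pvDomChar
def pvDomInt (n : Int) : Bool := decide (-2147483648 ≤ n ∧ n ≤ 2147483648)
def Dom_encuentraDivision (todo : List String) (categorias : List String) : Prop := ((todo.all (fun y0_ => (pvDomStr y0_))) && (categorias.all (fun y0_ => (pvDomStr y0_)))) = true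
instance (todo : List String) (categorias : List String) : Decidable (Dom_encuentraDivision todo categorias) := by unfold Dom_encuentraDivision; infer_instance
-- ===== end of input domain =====

-- B replaces A's two-pointer sweep by a one-pass value->sorted-positions index of todo plus, per categoria, a hand-written binary search for the next position >= a running cursor; same greedy earliest-match result.


-- ===== PORT A =====
-- while i<len(todo) and j<len(categorias): advance i, advance j on match; the
-- remaining suffix of todo stands for index i, the counter records i itself.
def pvGoA : List String → List String → Nat → List Int
  | [], _, _ => []
  | _ :: _, [], _ => []
  | t :: ts, c :: cs, i =>
    if t == c then (i : Int) :: pvGoA ts cs (i + 1)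
    else pvGoA ts (c :: cs) (i + 1)

def encuentraDivision (todo : List String) (categorias : List String) : List Int :=
  pvGoA todo categorias 0

-- ===== PORT B =====
-- _lower_bound(lst, x): binary search; lst[mid] is always in range, ported with getD 0 (exact here)
-- the while loop runs on fuel hi - lo (each step shrinks the interval, so the fuel suffices)
def pvLBGo (lst : List Int) (x : Int) : Nat → Nat → Nat → Nat
  | 0, lo, _ => lo
  | n + 1, lo, hi =>
    if lo < hi then
      let mid := (lo + hi) / 2
      if lst.getD mid 0 < x then pvLBGo lst x n (mid + 1) hi
      else pvLBGo lst x n lo mid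
    else lo

def pvLB (lst : List Int) (x : Int) (lo hi : Nat) : Nat := pvLBGo lst x (hi - lo) lo hi

-- for k, v in enumerate(todo): pos.setdefault(v, []).append(k)  — i.e. pos[v] = pos.get(v, []) + [k]
def pvBuildPos (todo : List String) : PySem.Dict String (List Int) :=
  (PySem.List.enumerate todo).foldl
    (fun d kv => d.modify kv.2 [] (fun l => l ++ [kv.1])) PySem.Dict.empty

-- for cat in categorias: lst = pos.get(cat); break if None; k = _lower_bound(lst, i); break if k == len(lst); append lst[k]; i = lst[k]+1
def pvGoB (d : PySem.Dict String (List Int)) : List String → Int → List Int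
  | [], _ => []
  | c :: cs, i =>
    match d.get? c with
    | none => []
    | some lst =>
      let k := pvLB lst i 0 lst.length
      if k = lst.length then []
      else lst.getD k 0 :: pvGoB d cs (lst.getD k 0 + 1)

def encuentraDivision_alt (todo : List String) (categorias : List String) : List Int :=
  pvGoB (pvBuildPos todo) categorias 0

-- ===== PRECONDITION & SPEC =====
def Spec_encuentraDivision (todo : List String) (categorias : List String) (out : List Int) : Prop := out = encuentraDivision_alt todo categorias
instance (todo : List String) (categorias : List String) (out : List Int) : Decidable (Spec_encuentraDivision todo categorias out) := by unfold Spec_encuentraDivision; infer_instance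

-- ===== CLAIM (what is proved, stated in full; the proofs are below) =====
def Claim_equal_encuentraDivision : Prop := ∀ (todo : List String) (categorias : List String), Dom_encuentraDivision todo categorias → Spec_encuentraDivision todo categorias (encuentraDivision todo categorias)

-- ===== LEMMAS AND PROOFS =====

-- the mathematical positions list: indices (as Int) of occurrences of c in todo, ascending
def pvPosL (todo : List String) (c : String) : List Int :=
  ((PySem.List.enumerate todo).filter (fun kv => kv.2 == c)).map (fun kv => kv.1)

theorem pvFold_getD (l : List (Int × String)) : ∀ (d : PySem.Dict String (List Int)) (c : String),
    (l.foldl (fun d kv => d.modify kv.2 [] (fun v => v ++ [kv.1])) d).getD c []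
      = d.getD c [] ++ (l.filter (fun kv => kv.2 == c)).map (fun kv => kv.1) := by
  induction l with
  | nil => intro d c; simp
  | cons x l ih =>
    intro d c
    simp only [List.foldl_cons, List.filter_cons]
    rw [ih]
    by_cases h : x.2 = c
    · subst h
      simp
    · have hb : (x.2 == c) = false := by simpa using h
      simp [hb, PySem.Dict.getD_modify, Ne.symm h]

theorem pvBuild_getD (todo : List String) (c : String) :
    (pvBuildPos todo).getD c [] = pvPosL todo c := by
  unfold pvBuildPos pvPosL
  rw [pvFold_getD]
  simp

theorem pvPosL_sorted (todo : List String) (c : String) :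
    (pvPosL todo c).Pairwise (· < ·) := by
  unfold pvPosL
  rw [List.pairwise_map]
  exact (PySem.List.pairwise_lt_enumerate todo 0).filter _

theorem pvPosL_mem (todo : List String) (c : String) (p : Int) :
    p ∈ pvPosL todo c ↔ ∃ k : Nat, ∃ h : k < todo.length, p = (k : Int) ∧ todo[k] = c := by
  unfold pvPosL
  simp only [List.mem_map, List.mem_filter, PySem.List.mem_enumerate_iff]
  constructor
  · rintro ⟨kv, ⟨⟨k, hk, rfl⟩, hc⟩, rfl⟩
    refine ⟨k, hk, by simp, by simpa using hc⟩
  · rintro ⟨k, hk, rfl, hc⟩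
    exact ⟨((k : Int), todo[k]), ⟨⟨k, hk, by simp⟩, by simpa using hc⟩, rfl⟩

theorem pvLB_inv (L : List Int) (x : Int) (hs : L.Pairwise (· ≤ ·)) :
    ∀ n lo hi, hi - lo ≤ n → hi ≤ L.length → lo ≤ hi →
    (∀ j, j < lo → L.getD j 0 < x) → (∀ j, hi ≤ j → j < L.length → x ≤ L.getD j 0) →
    lo ≤ pvLBGo L x n lo hi ∧ pvLBGo L x n lo hi ≤ hi ∧
      (∀ j, j < pvLBGo L x n lo hi → L.getD j 0 < x) ∧
      (∀ j, pvLBGo L x n lo hi ≤ j → j < L.length → x ≤ L.getD j 0) := by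
  have hmono : ∀ a b : Nat, a ≤ b → b < L.length → L.getD a 0 ≤ L.getD b 0 := by
    intro a b hab hb
    rcases Nat.lt_or_ge a b with h | h
    · have := (List.pairwise_iff_getElem.mp hs) a b (by omega) hb h
      rw [List.getD_eq_getElem _ _ (by omega), List.getD_eq_getElem _ _ hb]
      exact this
    · have : a = b := by omega
      subst this; rfl
  intro n
  induction n with
  | zero =>
    intro lo hi h hlen hlohi hlow hhigh
    simp only [pvLBGo]
    refine ⟨le_refl _, by omega, hlow, fun j hj hjl => hhigh j (by omega) hjl⟩
  | succ n ih =>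
    intro lo hi h hlen hlohi hlow hhigh
    by_cases hlt : lo < hi
    · rw [pvLBGo, if_pos hlt]
      have hmlt : (lo + hi) / 2 < hi := by omega
      have hmge : lo ≤ (lo + hi) / 2 := by omega
      simp only
      by_cases hc : L.getD ((lo + hi) / 2) 0 < x
      · rw [if_pos hc]
        have hlow' : ∀ j, j < (lo + hi) / 2 + 1 → L.getD j 0 < x := by
          intro j hj
          rcases Nat.lt_or_ge j lo with h' | h'
          · exact hlow j h'
          · exact lt_of_le_of_lt (hmono j ((lo + hi) / 2) (by omega) (by omega)) hc
        obtain ⟨h1, h2, h3, h4⟩ := ih ((lo + hi) / 2 + 1) hi (by omega) hlen (by omega) hlow' hhigh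
        exact ⟨by omega, h2, h3, h4⟩
      · rw [if_neg hc]
        have hhigh' : ∀ j, (lo + hi) / 2 ≤ j → j < L.length → x ≤ L.getD j 0 := by
          intro j hj hjl
          exact le_trans (by omega) (hmono ((lo + hi) / 2) j hj hjl)
        obtain ⟨h1, h2, h3, h4⟩ := ih lo ((lo + hi) / 2) (by omega) (by omega) (by omega) hlow hhigh'
        exact ⟨h1, by omega, h3, h4⟩
    · rw [pvLBGo, if_neg hlt]
      refine ⟨le_refl _, hlohi, hlow, fun j hj hjl => hhigh j (by omega) hjl⟩

theorem pvLB_drop (L : List Int) (x : Int) (hs : L.Pairwise (· ≤ ·)) :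
    pvLB L x 0 L.length ≤ L.length ∧
    L.drop (pvLB L x 0 L.length) = L.filter (fun p => x ≤ p) := by
  have hfuel : pvLB L x 0 L.length = pvLBGo L x L.length 0 L.length := by
    rw [pvLB, Nat.sub_zero]
  rw [hfuel]
  obtain ⟨-, h2, h3, h4⟩ := pvLB_inv L x hs L.length 0 L.length (by omega) (le_refl _)
    (by omega) (by omega) (fun j hj hjl => by omega)
  refine ⟨h2, ?_⟩
  conv_rhs => rw [← List.take_append_drop (pvLBGo L x L.length 0 L.length) L]
  rw [List.filter_append]
  have ht : (L.take (pvLBGo L x L.length 0 L.length)).filter (fun p => x ≤ p) = [] := by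
    rw [List.filter_eq_nil_iff]
    intro a ha
    rw [List.mem_iff_getElem] at ha
    obtain ⟨j, hj, rfl⟩ := ha
    have hjk : j < pvLBGo L x L.length 0 L.length := by
      have := hj; simp [List.length_take] at this; omega
    rw [List.getElem_take]
    have := h3 j hjk
    rw [List.getD_eq_getElem _ _ (by omega)] at this
    simp
    omega
  have hd : (L.drop (pvLBGo L x L.length 0 L.length)).filter (fun p => x ≤ p) = L.drop (pvLBGo L x L.length 0 L.length) := by
    rw [List.filter_eq_self]
    intro a ha
    rw [List.mem_iff_getElem] at ha
    obtain ⟨j, hj, rfl⟩ := ha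
    rw [List.getElem_drop]
    have hjl : pvLBGo L x L.length 0 L.length + j < L.length := by
      have := hj; simp [List.length_drop] at this; omega
    have := h4 (pvLBGo L x L.length 0 L.length + j) (by omega) hjl
    rw [List.getD_eq_getElem _ _ hjl] at this
    simpa using this
  rw [ht, hd, List.nil_append]

-- the value pvGoB's binary-search step extracts: first position of c in todo that is ≥ i
def pvNxt (todo : List String) (c : String) (i : Int) : Option Int :=
  ((pvPosL todo c).filter (fun p => i ≤ p)).head?

theorem pvGoB_cons (todo : List String) (c : String) (cs : List String) (i : Int) :
    pvGoB (pvBuildPos todo) (c :: cs) i =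
      match pvNxt todo c i with
      | none => []
      | some p => p :: pvGoB (pvBuildPos todo) cs (p + 1) := by
  show (match (pvBuildPos todo).get? c with
    | none => []
    | some lst =>
      let k := pvLB lst i 0 lst.length
      if k = lst.length then []
      else lst.getD k 0 :: pvGoB (pvBuildPos todo) cs (lst.getD k 0 + 1)) = _
  cases hg : (pvBuildPos todo).get? c with
  | none =>
    have hL : pvPosL todo c = [] := by
      have := PySem.Dict.getD_eq_get?_getD (d := pvBuildPos todo) (k := c) (d0 := ([] : List Int))
      rw [pvBuild_getD, hg] at this
      simpa using this.symm
    simp [pvNxt, hL]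
  | some L =>
    have hL : L = pvPosL todo c := by
      have := PySem.Dict.getD_of_get?_eq_some (d0 := ([] : List Int)) (h := hg)
      rw [pvBuild_getD] at this
      exact this.symm
    have hs : L.Pairwise (· ≤ ·) := by
      rw [hL]; exact (pvPosL_sorted todo c).imp le_of_lt
    obtain ⟨hk, hdrop⟩ := pvLB_drop L i hs
    simp only
    rw [pvNxt, ← hL, ← hdrop]
    by_cases he : pvLB L i 0 L.length = L.length
    · rw [if_pos he, he, List.drop_length, List.head?_nil]
    · rw [if_neg he]
      have hlt : pvLB L i 0 L.length < L.length := by omega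
      rw [List.head?_drop, List.getElem?_eq_getElem hlt,
        List.getD_eq_getElem _ _ hlt]

theorem pvGo_eq (todo : List String) : ∀ n (cs : List String) (i : Nat),
    todo.length - i ≤ n →
    pvGoA (todo.drop i) cs i = pvGoB (pvBuildPos todo) cs (i : Int) := by
  intro n
  induction n with
  | zero =>
    intro cs i h
    have hle : todo.length ≤ i := by omega
    rw [List.drop_eq_nil_of_le hle]
    cases cs with
    | nil => rfl
    | cons c cs =>
      rw [pvGoB_cons]
      have hnil : (pvPosL todo c).filter (fun p => (i : Int) ≤ p) = [] := by
        rw [List.filter_eq_nil_iff]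
        intro p hp
        obtain ⟨k, hk, rfl, -⟩ := (pvPosL_mem todo c p).mp hp
        simp; omega
      rw [show pvNxt todo c (i : Int) = none by rw [pvNxt, hnil]; rfl]
      rfl
  | succ n ih =>
    intro cs i h
    cases cs with
    | nil =>
      cases hd : todo.drop i with
      | nil => rfl
      | cons t ts => rfl
    | cons c cs =>
      by_cases hi : i < todo.length
      · rw [List.drop_eq_getElem_cons hi, pvGoB_cons]
        by_cases heq : todo[i] = c
        · have hmem : (i : Int) ∈ (pvPosL todo c).filter (fun p => (i : Int) ≤ p) := by
            rw [List.mem_filter]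
            exact ⟨(pvPosL_mem todo c _).mpr ⟨i, hi, rfl, heq⟩, by simp⟩
          have hnxt : pvNxt todo c (i : Int) = some (i : Int) := by
            rw [pvNxt]
            have hsF : ((pvPosL todo c).filter (fun p => (i : Int) ≤ p)).Pairwise (· < ·) :=
              (pvPosL_sorted todo c).filter _
            cases hF : (pvPosL todo c).filter (fun p => (i : Int) ≤ p) with
            | nil => rw [hF] at hmem; simp at hmem
            | cons f0 rest =>
              rw [hF] at hmem hsF
              have hf0 : (i : Int) ≤ f0 := by
                have : f0 ∈ (pvPosL todo c).filter (fun p => (i : Int) ≤ p) := by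
                  rw [hF]; exact List.mem_cons_self
                simpa using (List.mem_filter.mp this).2
              rcases List.mem_cons.mp hmem with h' | h'
              · rw [h']; rfl
              · have : f0 < (i : Int) := (List.pairwise_cons.mp hsF).1 _ h'
                omega
          rw [hnxt]
          simp only [pvGoA, heq, beq_self_eq_true, if_true]
          rw [show ((i : Int) + 1) = ((i + 1 : Nat) : Int) by push_cast; ring]
          rw [ih cs (i + 1) (by omega)]
        · have hfe : (pvPosL todo c).filter (fun p => (i : Int) ≤ p)
              = (pvPosL todo c).filter (fun p => ((i : Nat) + 1 : Int) ≤ p) := by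
            apply List.filter_congr
            intro p hp
            obtain ⟨k, hk, rfl, hc⟩ := (pvPosL_mem todo c p).mp hp
            have : k ≠ i := fun hki => heq (by subst hki; exact hc)
            simp only [decide_eq_decide]
            omega
          have hnn : pvNxt todo c (i : Int) = pvNxt todo c ((i + 1 : Nat) : Int) := by
            rw [pvNxt, pvNxt, hfe]; push_cast; ring_nf
          simp only [pvGoA, beq_iff_eq, heq, if_false]
          rw [hnn, ← pvGoB_cons todo c cs ((i + 1 : Nat) : Int)]
          exact ih (c :: cs) (i + 1) (by omega)
      · have hle : todo.length ≤ i := by omega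
        rw [List.drop_eq_nil_of_le hle, pvGoB_cons]
        have hnil : (pvPosL todo c).filter (fun p => (i : Int) ≤ p) = [] := by
          rw [List.filter_eq_nil_iff]
          intro p hp
          obtain ⟨k, hk, rfl, -⟩ := (pvPosL_mem todo c p).mp hp
          simp; omega
        rw [show pvNxt todo c (i : Int) = none by rw [pvNxt, hnil]; rfl]
        rfl

-- ===== VERDICT (by name: the statement is the Claim_ definition above) =====
theorem encuentraDivision_spec : Claim_equal_encuentraDivision := by
  intro todo categorias _
  unfold Spec_encuentraDivision encuentraDivision encuentraDivision_alt
  simpa using pvGo_eq todo todo.length categorias 0 (by omega)
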